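-- pv_equiv track=rewrite | github.com/jshaffstall/AdventOfCode | 2021/Day08B.py | good_fit
-- ===== SOURCE A (Python) =====
-- def good_fit(segments, which, display):
--     display = [c for c in display]
--     matched = []
--
--     for c in display:
--         for segment in which:
--             if c in segments[segment] and segment not in matched:
--                 matched.append(segment)
--
--     return len(matched) == len(display)
-- ===== SOURCE B (Python) =====
-- def good_fit(segments, which, display):
--     # Inverted index: char -> set of segment keys containing it, built once over which.
--     index = {}
--     for seg in dict.fromkeys(which):
--         for c in segments.get(seg, ''):
--             index.setdefault(c, set()).add(seg)
--     matched = set()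
--     for c in display:
--         matched |= index.get(c, set())
--     return len(matched) == len(display)
-- ===== Notes on version B (the rewrite author's own statement) =====
-- stated objective: alternative
-- what changed: Replaces A's nested scans (for each display char, scan `which` testing string containment and appending to a growing matched list) by an inverted index char->segment-set built once over dedup(which), then a single pass over the display unioning index lookups; returns count(matched)==len(display).
import Mathlib
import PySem

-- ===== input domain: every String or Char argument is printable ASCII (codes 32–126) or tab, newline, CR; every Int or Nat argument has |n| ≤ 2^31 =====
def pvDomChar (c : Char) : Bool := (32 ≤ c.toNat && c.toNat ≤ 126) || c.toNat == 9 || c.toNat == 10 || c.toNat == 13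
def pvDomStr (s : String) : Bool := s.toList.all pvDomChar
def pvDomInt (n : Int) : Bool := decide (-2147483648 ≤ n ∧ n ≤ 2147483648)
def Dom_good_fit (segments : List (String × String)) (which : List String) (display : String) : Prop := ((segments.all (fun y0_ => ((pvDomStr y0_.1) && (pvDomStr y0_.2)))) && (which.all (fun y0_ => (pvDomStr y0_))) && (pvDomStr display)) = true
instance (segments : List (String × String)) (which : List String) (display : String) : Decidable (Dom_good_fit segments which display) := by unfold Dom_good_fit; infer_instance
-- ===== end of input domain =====

-- B replaces A's nested scans (per display char, scan `which` and test string containment,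
-- appending to a growing accumulator) by an inverted index char→segments built once over
-- dedup(which), then a single pass over the display unioning index lookups (objective: alternative).

-- A-side helper: segments[s] as a list of chars (totalised with getD; Pre_ excludes the
-- inputs where the Python lookup raises KeyError)
def segChars (segments : List (String × String)) (s : String) : List Char :=
  (((PySem.Dict.mk segments).get? s).getD "").toList

-- ===== PORT A =====
def good_fit (segments : List (String × String)) (which : List String) (display : String) : Bool :=
  let displayL := display.toList
  let matched := displayL.foldl
    (fun matched c =>
      which.foldl
        (fun matched segment =>
          if c ∈ segChars segments segment ∧ segment ∉ matched then matched ++ [segment]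
          else matched)
        matched)
    []
  matched.length == displayL.length

-- ===== PORT B =====
-- index.setdefault(c, set()).add(seg) is Dict.modify c [] (Set.add · seg): d[c] = d.get(c, set()) ∪ {seg},
-- new keys appended, existing keys kept in place — exact for Python's setdefault + in-place add.
-- segments.get(seg, '') is (get? seg).getD ""; matched |= s is Set.update.
def good_fit_alt (segments : List (String × String)) (which : List String) (display : String) : Bool :=
  let index := (PySem.List.dedup which).foldl
    (fun idx seg =>
      ((((PySem.Dict.mk segments).get? seg).getD "").toList).foldl
        (fun idx c => idx.modify c [] (fun st => PySem.Set.add st seg)) idx)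
    PySem.Dict.empty
  let matched := display.toList.foldl
    (fun m c => PySem.Set.update m (index.getD c [])) ([] : PySem.Set String)
  matched.length == display.toList.length

-- ===== PRECONDITION & SPEC =====
-- Pre_ excludes exactly the inputs where Python A raises KeyError: a nonempty display with
-- some element of `which` that is not a key of `segments`.
def Pre_good_fit (segments : List (String × String)) (which : List String) (display : String) : Prop :=
  display.toList = [] ∨ ∀ s ∈ which, ((PySem.Dict.mk segments).get? s).isSome = true
instance (segments : List (String × String)) (which : List String) (display : String) : Decidable (Pre_good_fit segments which display) := by unfold Pre_good_fit; infer_instance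

def pvWitness_good_fit : (List (String × String)) × List String × String :=
  ([("a", "abc"), ("b", "d")], ["a", "b", "a"], "ad")

def Spec_good_fit (segments : List (String × String)) (which : List String) (display : String) (out : Bool) : Prop := out = good_fit_alt segments which display
instance (segments : List (String × String)) (which : List String) (display : String) (out : Bool) : Decidable (Spec_good_fit segments which display out) := by unfold Spec_good_fit; infer_instance

-- ===== CLAIM (what is proved, stated in full; the proofs are below) =====
def Claim_equal_good_fit : Prop := ∀ (segments : List (String × String)) (which : List String) (display : String), Dom_good_fit segments which display → Pre_good_fit segments which display → Spec_good_fit segments which display (good_fit segments which display)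

-- ===== LEMMAS AND PROOFS =====

-- A's inner loop over `which`, for one display char c
lemma inner_mem (segments : List (String × String)) (c : Char) :
    ∀ (which : List String) (acc : List String) (s : String),
      s ∈ which.foldl (fun m segment =>
            if c ∈ segChars segments segment ∧ segment ∉ m then m ++ [segment] else m) acc
        ↔ s ∈ acc ∨ (s ∈ which ∧ c ∈ segChars segments s) := by
  intro which
  induction which with
  | nil => intro acc s; simp
  | cons t ts ih =>
    intro acc s
    simp only [List.foldl_cons, ih, List.mem_cons]
    split_ifs with h
    · simp only [List.mem_append, List.mem_singleton]
      constructor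
      · rintro ((hs | rfl) | ⟨hts, hm⟩)
        · exact Or.inl hs
        · exact Or.inr ⟨Or.inl rfl, h.1⟩
        · exact Or.inr ⟨Or.inr hts, hm⟩
      · rintro (hs | ⟨(rfl | hts), hm⟩)
        · exact Or.inl (Or.inl hs)
        · exact Or.inl (Or.inr rfl)
        · exact Or.inr ⟨hts, hm⟩
    · constructor
      · rintro (hs | ⟨hts, hm⟩)
        · exact Or.inl hs
        · exact Or.inr ⟨Or.inr hts, hm⟩
      · rintro (hs | ⟨(rfl | hts), hm⟩)
        · exact Or.inl hs
        · rcases not_and_or.mp h with hnc | hin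
          · exact absurd hm hnc
          · exact Or.inl (not_not.mp hin)
        · exact Or.inr ⟨hts, hm⟩

lemma inner_nodup (segments : List (String × String)) (c : Char) :
    ∀ (which : List String) (acc : List String), acc.Nodup →
      (which.foldl (fun m segment =>
        if c ∈ segChars segments segment ∧ segment ∉ m then m ++ [segment] else m) acc).Nodup := by
  intro which
  induction which with
  | nil => intro acc h; simpa using h
  | cons t ts ih =>
    intro acc h
    simp only [List.foldl_cons]
    apply ih
    split_ifs with hc
    · exact List.Nodup.append h (List.nodup_singleton t) (by simpa using hc.2)
    · exact h

-- A's outer loop over the display chars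
lemma outer_mem (segments : List (String × String)) (which : List String) :
    ∀ (cs : List Char) (acc : List String) (s : String),
      s ∈ cs.foldl (fun m c =>
            which.foldl (fun m segment =>
              if c ∈ segChars segments segment ∧ segment ∉ m then m ++ [segment] else m) m) acc
        ↔ s ∈ acc ∨ (s ∈ which ∧ ∃ c ∈ cs, c ∈ segChars segments s) := by
  intro cs
  induction cs with
  | nil => intro acc s; simp
  | cons c cs ih =>
    intro acc s
    simp only [List.foldl_cons, ih, inner_mem, List.mem_cons]
    constructor
    · rintro ((hs | ⟨hw, hc⟩) | ⟨hw, d, hd, hcd⟩)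
      · exact Or.inl hs
      · exact Or.inr ⟨hw, c, Or.inl rfl, hc⟩
      · exact Or.inr ⟨hw, d, Or.inr hd, hcd⟩
    · rintro (hs | ⟨hw, d, (rfl | hd), hcd⟩)
      · exact Or.inl (Or.inl hs)
      · exact Or.inl (Or.inr ⟨hw, hcd⟩)
      · exact Or.inr ⟨hw, d, hd, hcd⟩

lemma outer_nodup (segments : List (String × String)) (which : List String) :
    ∀ (cs : List Char) (acc : List String), acc.Nodup →
      (cs.foldl (fun m c =>
        which.foldl (fun m segment =>
          if c ∈ segChars segments segment ∧ segment ∉ m then m ++ [segment] else m) m) acc).Nodup := by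
  intro cs
  induction cs with
  | nil => intro acc h; simpa using h
  | cons c cs ih =>
    intro acc h
    simp only [List.foldl_cons]
    exact ih _ (inner_nodup segments c which acc h)

-- B's per-segment index update: folding the chars of one segment
lemma idx_chars_mem (seg : String) :
    ∀ (cs : List Char) (idx : PySem.Dict Char (PySem.Set String)) (c' : Char) (s : String),
      s ∈ (cs.foldl (fun idx c => idx.modify c [] (fun st => PySem.Set.add st seg)) idx).getD c' []
        ↔ s ∈ idx.getD c' [] ∨ (c' ∈ cs ∧ s = seg) := by
  intro cs
  induction cs with
  | nil => intro idx c' s; simp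
  | cons c cs ih =>
    intro idx c' s
    simp only [List.foldl_cons, ih, PySem.Dict.getD_modify, List.mem_cons]
    by_cases hc : c' = c
    · subst hc
      simp only [if_true, PySem.Set.mem_add, true_or, true_and]
      tauto
    · simp only [if_neg hc]
      tauto

-- B's whole index: membership of a segment in index[c]
lemma idx_mem (segments : List (String × String)) :
    ∀ (ws : List String) (idx : PySem.Dict Char (PySem.Set String)) (c : Char) (s : String),
      s ∈ (ws.foldl (fun idx seg =>
            ((((PySem.Dict.mk segments).get? seg).getD "").toList).foldl
              (fun idx c => idx.modify c [] (fun st => PySem.Set.add st seg)) idx) idx).getD c []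
        ↔ s ∈ idx.getD c [] ∨ (s ∈ ws ∧ c ∈ segChars segments s) := by
  intro ws
  induction ws with
  | nil => intro idx c s; simp
  | cons w ws ih =>
    intro idx c s
    simp only [List.foldl_cons, ih, idx_chars_mem, List.mem_cons]
    unfold segChars
    constructor
    · rintro ((h | ⟨hc, rfl⟩) | ⟨hs, hc⟩)
      · exact Or.inl h
      · exact Or.inr ⟨Or.inl rfl, hc⟩
      · exact Or.inr ⟨Or.inr hs, hc⟩
    · rintro (h | ⟨(rfl | hs), hc⟩)
      · exact Or.inl (Or.inl h)
      · exact Or.inl (Or.inr ⟨hc, rfl⟩)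
      · exact Or.inr ⟨hs, hc⟩

-- B's display pass: membership in the union of index lookups
lemma matched_mem (index : PySem.Dict Char (PySem.Set String)) :
    ∀ (cs : List Char) (m : PySem.Set String) (s : String),
      s ∈ cs.foldl (fun m c => PySem.Set.update m (index.getD c [])) m
        ↔ s ∈ m ∨ ∃ c ∈ cs, s ∈ index.getD c [] := by
  intro cs
  induction cs with
  | nil => intro m s; simp
  | cons c cs ih =>
    intro m s
    simp only [List.foldl_cons, ih, PySem.Set.mem_update, List.mem_cons]
    constructor
    · rintro ((h | h) | ⟨d, hd, hds⟩)
      · exact Or.inl h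
      · exact Or.inr ⟨c, Or.inl rfl, h⟩
      · exact Or.inr ⟨d, Or.inr hd, hds⟩
    · rintro (h | ⟨d, (rfl | hd), hds⟩)
      · exact Or.inl (Or.inl h)
      · exact Or.inl (Or.inr hds)
      · exact Or.inr ⟨d, hd, hds⟩

lemma matched_nodup (index : PySem.Dict Char (PySem.Set String)) :
    ∀ (cs : List Char) (m : PySem.Set String), m.Nodup →
      (cs.foldl (fun m c => PySem.Set.update m (index.getD c [])) m).Nodup := by
  intro cs
  induction cs with
  | nil => intro m h; simpa using h
  | cons c cs ih =>
    intro m h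
    simp only [List.foldl_cons]
    exact ih _ (PySem.Set.nodup_update _ _ h)

-- ===== VERDICT (by name: the statement is the Claim_ definition above) =====
theorem good_fit_spec : Claim_equal_good_fit := by
  intro segments which display _ _
  unfold Spec_good_fit good_fit good_fit_alt
  have hperm :
      (display.toList.foldl (fun m c =>
          which.foldl (fun m segment =>
            if c ∈ segChars segments segment ∧ segment ∉ m then m ++ [segment] else m) m) []).Perm
        (display.toList.foldl
          (fun m c => PySem.Set.update m
            (((PySem.List.dedup which).foldl (fun idx seg =>
              ((((PySem.Dict.mk segments).get? seg).getD "").toList).foldl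
                (fun idx c => idx.modify c [] (fun st => PySem.Set.add st seg)) idx)
              PySem.Dict.empty).getD c [])) []) := by
    rw [List.perm_ext_iff_of_nodup
      (outer_nodup segments which display.toList [] List.nodup_nil)
      (matched_nodup _ display.toList [] List.nodup_nil)]
    intro s
    rw [outer_mem, matched_mem]
    simp only [List.not_mem_nil, false_or]
    constructor
    · rintro ⟨hw, c, hc, hcs⟩
      exact ⟨c, hc, (idx_mem segments _ _ c s).2 (Or.inr ⟨((PySem.List.mem_dedup _ _).2 hw), hcs⟩)⟩
    · rintro ⟨c, hc, hs⟩
      rcases (idx_mem segments _ _ c s).1 hs with h | ⟨hw, hcs⟩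
      · simp [PySem.Dict.getD_empty] at h
      · exact ⟨((PySem.List.mem_dedup _ _).1 hw), c, hc, hcs⟩
  show ((display.toList.foldl (fun m c =>
      which.foldl (fun m segment =>
        if c ∈ segChars segments segment ∧ segment ∉ m then m ++ [segment] else m) m) []).length
      == display.toList.length) = _
  rw [hperm.length_eq]
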